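-- pv_equiv track=rewrite | github.com/prism-engines/prism | fetchers/ecology_fetcher.py | _group_signals
-- ===== SOURCE A (Python) =====
-- from typing import Any, Dict, List, Optional
--
-- def _group_signals(signals: List[str]) -> Dict[str, List[str]]:
--     """Group signals by data source."""
--     groups = {
--         "fao": [],
--         "wwf": [],
--         "nasa_fire": [],
--         "noaa_ocean": [],
--         "vegetation": [],
--         "phenology": [],
--         "forest": [],
--         "derived": [],
--     }
--
--     mapping = {
--         "FOOD_PRICE": "fao",
--         "CROP_YIELD": "fao",
--         "LIVING_PLANET": "wwf",
--         "LPI_": "wwf",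
--         "RED_LIST": "wwf",
--         "BIRD_POPULATION": "wwf",
--         "INSECT_": "wwf",
--         "POLLINATOR": "wwf",
--         "FIRE_": "nasa_fire",
--         "CHLOROPHYLL": "noaa_ocean",
--         "OCEAN_PH": "noaa_ocean",
--         "CORAL_": "noaa_ocean",
--         "MARINE_HEATWAVE": "noaa_ocean",
--         "DEAD_ZONE": "noaa_ocean",
--         "NDVI_": "vegetation",
--         "EVI_": "vegetation",
--         "GPP_": "vegetation",
--         "NPP_": "vegetation",
--         "LAI_": "vegetation",
--         "FPAR_": "vegetation",
--         "GREENUP": "phenology",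
--         "SENESCENCE": "phenology",
--         "GROWING_SEASON": "phenology",
--         "BLOOM_": "phenology",
--         "LEAF_OUT": "phenology",
--         "FOREST_LOSS": "forest",
--         "TREE_MORTALITY": "forest",
--         "BARK_BEETLE": "forest",
--         "CARBON_SINK": "forest",
--     }
--
--     for ind in signals:
--         assigned = False
--         for prefix, source in mapping.items():
--             if ind.startswith(prefix):
--                 groups[source].append(ind)
--                 assigned = True
--                 break
--         if not assigned:
--             groups["derived"].append(ind)
--
--     return {k: v for k, v in groups.items() if v}
-- ===== SOURCE B (Python) =====
-- from typing import Dict, List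
--
-- _SOURCES = [
--     ("fao", ["FOOD_PRICE", "CROP_YIELD"]),
--     ("wwf", ["LIVING_PLANET", "LPI_", "RED_LIST", "BIRD_POPULATION", "INSECT_", "POLLINATOR"]),
--     ("nasa_fire", ["FIRE_"]),
--     ("noaa_ocean", ["CHLOROPHYLL", "OCEAN_PH", "CORAL_", "MARINE_HEATWAVE", "DEAD_ZONE"]),
--     ("vegetation", ["NDVI_", "EVI_", "GPP_", "NPP_", "LAI_", "FPAR_"]),
--     ("phenology", ["GREENUP", "SENESCENCE", "GROWING_SEASON", "BLOOM_", "LEAF_OUT"]),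
--     ("forest", ["FOREST_LOSS", "TREE_MORTALITY", "BARK_BEETLE", "CARBON_SINK"]),
-- ]
--
-- _ALL_PREFIXES = [p for _, ps in _SOURCES for p in ps]
--
--
-- def _group_signals(signals: List[str]) -> Dict[str, List[str]]:
--     """Group signals by data source (category-major scan instead of signal-major)."""
--     result = {}
--     for src, prefixes in _SOURCES:
--         bucket = [s for s in signals if any(s.startswith(p) for p in prefixes)]
--         if bucket:
--             result[src] = bucket
--     derived = [s for s in signals if not any(s.startswith(p) for p in _ALL_PREFIXES)]
--     if derived:
--         result["derived"] = derived
--     return result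
-- ===== Notes on version B (the rewrite author's own statement) =====
-- stated objective: alternative
-- what changed: Transposed the loop structure: instead of iterating signals and scanning the 29-entry prefix map with a break per signal, B inverts the map into per-source prefix lists once and builds each bucket by a category-major filtering pass over the signals (derived = signals matching no prefix), assembling the dict in the fixed source order and dropping empty buckets.
import Mathlib
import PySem

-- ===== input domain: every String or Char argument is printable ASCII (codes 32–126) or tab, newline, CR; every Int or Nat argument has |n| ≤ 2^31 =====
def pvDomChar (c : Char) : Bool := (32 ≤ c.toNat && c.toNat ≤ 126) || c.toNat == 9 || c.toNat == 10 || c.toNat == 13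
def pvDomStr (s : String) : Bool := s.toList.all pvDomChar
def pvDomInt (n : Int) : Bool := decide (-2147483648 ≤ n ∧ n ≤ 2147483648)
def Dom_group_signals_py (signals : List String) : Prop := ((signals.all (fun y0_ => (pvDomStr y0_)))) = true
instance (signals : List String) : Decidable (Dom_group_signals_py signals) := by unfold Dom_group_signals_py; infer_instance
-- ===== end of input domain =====

-- B transposes A's signal-major scan (inner prefix loop with break) into a category-major
-- filtering pass per source; same exact result, similar cost ("alternative" decomposition).

-- ===== PORT A =====
def pvMapping : List (String × String) := [
  ("FOOD_PRICE","fao"),("CROP_YIELD","fao"),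
  ("LIVING_PLANET","wwf"),("LPI_","wwf"),("RED_LIST","wwf"),("BIRD_POPULATION","wwf"),
  ("INSECT_","wwf"),("POLLINATOR","wwf"),
  ("FIRE_","nasa_fire"),
  ("CHLOROPHYLL","noaa_ocean"),("OCEAN_PH","noaa_ocean"),("CORAL_","noaa_ocean"),
  ("MARINE_HEATWAVE","noaa_ocean"),("DEAD_ZONE","noaa_ocean"),
  ("NDVI_","vegetation"),("EVI_","vegetation"),("GPP_","vegetation"),("NPP_","vegetation"),
  ("LAI_","vegetation"),("FPAR_","vegetation"),
  ("GREENUP","phenology"),("SENESCENCE","phenology"),("GROWING_SEASON","phenology"),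
  ("BLOOM_","phenology"),("LEAF_OUT","phenology"),
  ("FOREST_LOSS","forest"),("TREE_MORTALITY","forest"),("BARK_BEETLE","forest"),("CARBON_SINK","forest")]

def pvInitGroups : PySem.Dict String (List String) :=
  PySem.Dict.ofList [("fao",[]),("wwf",[]),("nasa_fire",[]),("noaa_ocean",[]),
                     ("vegetation",[]),("phenology",[]),("forest",[]),("derived",[])]

-- the inner "for prefix, source in mapping.items(): if ind.startswith(prefix): ...; break" loop
def pvAssign (ind : String) : List (String × String) → PySem.Dict String (List String) →
    PySem.Dict String (List String) × Bool
  | [], g => (g, false)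
  | ps :: rest, g =>
    if PySem.Str.startswith ind ps.1 then (g.modify ps.2 [] (· ++ [ind]), true)
    else pvAssign ind rest g

def group_signals_py (signals : List String) : List (String × List String) :=
  (signals.foldl (fun g ind =>
      let r := pvAssign ind pvMapping g
      if r.2 then r.1 else r.1.modify "derived" [] (· ++ [ind])) pvInitGroups).items.filter
    (fun kv => !kv.2.isEmpty)

-- ===== PORT B =====
def pvSources : List (String × List String) := [
  ("fao", ["FOOD_PRICE", "CROP_YIELD"]),
  ("wwf", ["LIVING_PLANET", "LPI_", "RED_LIST", "BIRD_POPULATION", "INSECT_", "POLLINATOR"]),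
  ("nasa_fire", ["FIRE_"]),
  ("noaa_ocean", ["CHLOROPHYLL", "OCEAN_PH", "CORAL_", "MARINE_HEATWAVE", "DEAD_ZONE"]),
  ("vegetation", ["NDVI_", "EVI_", "GPP_", "NPP_", "LAI_", "FPAR_"]),
  ("phenology", ["GREENUP", "SENESCENCE", "GROWING_SEASON", "BLOOM_", "LEAF_OUT"]),
  ("forest", ["FOREST_LOSS", "TREE_MORTALITY", "BARK_BEETLE", "CARBON_SINK"])]

def pvAllPrefixes : List String := (pvSources.map (·.2)).flatten

def pvMatchesAny (s : String) (ps : List String) : Bool :=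
  ps.any (fun p => PySem.Str.startswith s p)

def group_signals_py_alt (signals : List String) : List (String × List String) :=
  let main := pvSources.foldl (fun acc sp =>
      let bucket := signals.filter (fun s => pvMatchesAny s sp.2)
      if bucket.isEmpty then acc else acc ++ [(sp.1, bucket)]) []
  let derived := signals.filter (fun s => !pvMatchesAny s pvAllPrefixes)
  if derived.isEmpty then main else main ++ [("derived", derived)]

-- ===== PRECONDITION & SPEC =====
def Spec_group_signals_py (signals : List String) (out : List (String × List String)) : Prop := out = group_signals_py_alt signals
instance (signals : List String) (out : List (String × List String)) : Decidable (Spec_group_signals_py signals out) := by unfold Spec_group_signals_py; infer_instance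

-- ===== CLAIM (what is proved, stated in full; the proofs are below) =====
def Claim_equal_group_signals_py : Prop := ∀ (signals : List String), Dom_group_signals_py signals → Spec_group_signals_py signals (group_signals_py signals)

-- ===== LEMMAS AND PROOFS =====

-- first-match classification: the source A's inner loop assigns to a signal
def pvClassify (s : String) : String :=
  match pvMapping.find? (fun ps => PySem.Str.startswith s ps.1) with
  | some ps => ps.2
  | none => "derived"

def pvKeys29 : List String := pvMapping.map (·.1)

def pvInitKeys : List String :=
  ["fao","wwf","nasa_fire","noaa_ocean","vegetation","phenology","forest","derived"]

-- the canonical form both ports reduce to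
def pvCanon (signals : List String) : List (String × List String) :=
  (pvInitKeys.map (fun k => (k, signals.filter (fun s => pvClassify s == k)))).filter
    (fun kv => !kv.2.isEmpty)

theorem pvAssign_eq (ind : String) (l : List (String × String))
    (g : PySem.Dict String (List String)) :
    pvAssign ind l g =
      match l.find? (fun ps => PySem.Str.startswith ind ps.1) with
      | some ps => (g.modify ps.2 [] (· ++ [ind]), true)
      | none => (g, false) := by
  induction l generalizing g with
  | nil => rfl
  | cons ps rest ih =>
    cases h : PySem.Chars.startswith ind.toList ps.1.toList with
    | true => simp [pvAssign, List.find?, h]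
    | false => simp [pvAssign, List.find?, h, ih]

theorem pvStep_eq (g : PySem.Dict String (List String)) (ind : String) :
    (let r := pvAssign ind pvMapping g
     if r.2 then r.1 else r.1.modify "derived" [] (· ++ [ind])) =
    g.modify (pvClassify ind) [] (· ++ [ind]) := by
  rw [pvAssign_eq]
  unfold pvClassify
  cases h : pvMapping.find? (fun ps => PySem.Str.startswith ind ps.1) <;> simp

-- no key of the mapping is a (proper) prefix of another key
theorem pv_nonprefix : ∀ a ∈ pvKeys29, ∀ b ∈ pvKeys29,
    PySem.Str.startswith a b = true → a = b := by decide

theorem pv_uniq (s q1 q2 : String) (h1 : q1 ∈ pvKeys29) (h2 : q2 ∈ pvKeys29)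
    (m1 : PySem.Str.startswith s q1 = true) (m2 : PySem.Str.startswith s q2 = true) :
    q1 = q2 := by
  rw [PySem.Str.startswith_eq, PySem.Chars.startswith_iff] at m1 m2
  rcases List.prefix_or_prefix_of_prefix m1 m2 with h | h
  · exact (pv_nonprefix q2 h2 q1 h1 (by rw [PySem.Str.startswith_eq, PySem.Chars.startswith_iff]; exact h)).symm
  · exact pv_nonprefix q1 h1 q2 h2 (by rw [PySem.Str.startswith_eq, PySem.Chars.startswith_iff]; exact h)

theorem pv_sw_vec (s p : String) (hp : p ∈ pvKeys29)
    (hm : PySem.Str.startswith s p = true) :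
    ∀ q ∈ pvKeys29, PySem.Str.startswith s q = decide (q = p) := by
  intro q hq
  cases h : PySem.Str.startswith s q with
  | true => simp [pv_uniq s q p hq hp h hm]
  | false =>
    have : q ≠ p := fun e => by rw [e] at h; rw [h] at hm; exact Bool.false_ne_true hm
    simp [this]

theorem pv_any_eq_mem (l : List String) (p : String) :
    (l.any (fun q => decide (q = p))) = decide (p ∈ l) := by
  induction l with
  | nil => simp
  | cons a t ih => simp [List.any_cons, ih, List.mem_cons, eq_comm (a := a) (b := p)]

theorem pv_matches_eq (s p : String) (l : List String)
    (hsub : ∀ q ∈ l, q ∈ pvKeys29) (hp : p ∈ pvKeys29)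
    (hm : PySem.Str.startswith s p = true) :
    pvMatchesAny s l = decide (p ∈ l) := by
  unfold pvMatchesAny
  rw [PySem.List.any_congr_mem (g := fun q => decide (q = p))
       (fun q hq => pv_sw_vec s p hp hm q (hsub q hq))]
  exact pv_any_eq_mem l p

theorem pv_matches_none (s : String) (l : List String)
    (hsub : ∀ q ∈ l, q ∈ pvKeys29)
    (hall : ∀ ps ∈ pvMapping, ¬ (PySem.Str.startswith s ps.1 = true)) :
    pvMatchesAny s l = false := by
  unfold pvMatchesAny
  rw [List.any_eq_false]
  intro q hq
  have : q ∈ pvKeys29 := hsub q hq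
  rcases List.mem_map.mp this with ⟨ps, hps, rfl⟩
  simpa using hall ps hps

theorem pv_cat (l : List String) (k : String)
    (hsub : ∀ q ∈ l, q ∈ pvKeys29)
    (hlk : ∀ ps ∈ pvMapping, decide (ps.1 ∈ l) = (ps.2 == k))
    (hk : ("derived" == k) = false) :
    ∀ s, pvMatchesAny s l = (pvClassify s == k) := by
  intro s
  unfold pvClassify
  cases h : pvMapping.find? (fun ps => PySem.Str.startswith s ps.1) with
  | none =>
    rw [pv_matches_none s l hsub (by simpa using List.find?_eq_none.mp h)]
    exact hk.symm
  | some ps =>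
    have hmem := List.mem_of_find?_eq_some h
    have hmatch : PySem.Str.startswith s ps.1 = true := by simpa using List.find?_some h
    rw [pv_matches_eq s ps.1 l hsub (List.mem_map.mpr ⟨ps, hmem, rfl⟩) hmatch]
    exact hlk ps hmem

theorem pv_derived : ∀ s, (!pvMatchesAny s pvAllPrefixes) = (pvClassify s == "derived") := by
  intro s
  unfold pvClassify
  cases h : pvMapping.find? (fun ps => PySem.Str.startswith s ps.1) with
  | none =>
    rw [pv_matches_none s pvAllPrefixes (by decide) (by simpa using List.find?_eq_none.mp h)]
    rfl
  | some ps =>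
    have hmem := List.mem_of_find?_eq_some h
    have hmatch : PySem.Str.startswith s ps.1 = true := by simpa using List.find?_some h
    rw [pv_matches_eq s ps.1 pvAllPrefixes (by decide)
          (List.mem_map.mpr ⟨ps, hmem, rfl⟩) hmatch]
    have h1 : decide (ps.1 ∈ pvAllPrefixes) = true :=
      (by decide : ∀ ps ∈ pvMapping, decide (ps.1 ∈ pvAllPrefixes) = true) ps hmem
    have h2 : (ps.2 == "derived") = false :=
      (by decide : ∀ ps ∈ pvMapping, (ps.2 == "derived") = false) ps hmem
    rw [h1, h2]
    rfl

theorem pv_classify_mem (s : String) : pvClassify s ∈ pvInitKeys := by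
  unfold pvClassify
  cases h : pvMapping.find? (fun ps => PySem.Str.startswith s ps.1) with
  | none => decide
  | some ps =>
    have hmem := List.mem_of_find?_eq_some h
    show ps.2 ∈ pvInitKeys
    exact (by decide : ∀ ps ∈ pvMapping, ps.2 ∈ pvInitKeys) ps hmem

theorem pv_set_update_id (l ks : List String) (h : ∀ x ∈ l, x ∈ ks) :
    PySem.Set.update ks l = ks := by
  induction l generalizing ks with
  | nil => rfl
  | cons a t ih =>
    have ha : PySem.Set.add ks a = ks := by
      simp [PySem.Set.add, PySem.Set.contains, h a (List.mem_cons_self)]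
    show PySem.Set.update (PySem.Set.add ks a) t = ks
    rw [ha]
    exact ih ks (fun x hx => h x (List.mem_cons_of_mem a hx))

theorem pv_A_eq (signals : List String) : group_signals_py signals = pvCanon signals := by
  unfold group_signals_py pvCanon
  have hbody : (fun (g : PySem.Dict String (List String)) ind =>
      let r := pvAssign ind pvMapping g
      if r.2 then r.1 else r.1.modify "derived" [] (· ++ [ind])) =
      (fun g ind => g.modify (pvClassify ind) [] (· ++ [ind])) := by
    funext g ind; exact pvStep_eq g ind
  rw [hbody]
  have hfold : signals.foldl (fun g ind => g.modify (pvClassify ind) [] (· ++ [ind])) pvInitGroups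
      = (signals.map (fun s => (pvClassify s, s))).foldl
          (fun d p => d.modify p.1 [] (· ++ [p.2])) pvInitGroups := by
    rw [List.foldl_map]
  rw [hfold]
  set D := (signals.map (fun s => (pvClassify s, s))).foldl
      (fun d p => d.modify p.1 [] (· ++ [p.2])) pvInitGroups with hD
  have hkeys : D.keys = pvInitKeys := by
    rw [hD]
    have := PySem.Dict.keys_foldl_modify_key (l := signals.map (fun s => (pvClassify s, s)))
      (key := (·.1)) (d0 := []) (f := fun _ p => (· ++ [p.2])) (d := pvInitGroups)
    rw [this]
    have hik : pvInitGroups.keys = pvInitKeys := by decide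
    rw [hik]
    apply pv_set_update_id
    intro x hx
    rcases List.mem_map.mp hx with ⟨p, hp, rfl⟩
    rcases List.mem_map.mp hp with ⟨s, _, rfl⟩
    exact pv_classify_mem s
  have hnd : D.keys.Nodup := by rw [hkeys]; decide
  rw [PySem.Dict.items_eq_map_keys D hnd []]
  rw [hkeys]
  congr 1
  apply List.map_congr_left
  intro k hk
  have hgetD : D.getD k [] = signals.filter (fun s => pvClassify s == k) := by
    rw [hD, PySem.Dict.getD_foldl_modify_append]
    have h0 : pvInitGroups.getD k [] = [] := by
      revert hk; revert k
      exact (by decide : ∀ k ∈ pvInitKeys, pvInitGroups.getD k [] = [])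
    rw [h0, List.nil_append, List.filter_map, List.map_map]
    simp [Function.comp_def]
  rw [hgetD]

theorem pv_cat_src : ∀ sp ∈ pvSources,
    (signals : List String) →
    signals.filter (fun s => pvMatchesAny s sp.2) =
      signals.filter (fun s => pvClassify s == sp.1) := by
  intro sp hsp signals
  apply List.filter_congr
  intro s _
  exact pv_cat sp.2 sp.1
    (by revert hsp; revert sp;
        exact (by decide : ∀ sp ∈ pvSources, ∀ q ∈ sp.2, q ∈ pvKeys29))
    (by revert hsp; revert sp;
        exact (by decide : ∀ sp ∈ pvSources, ∀ ps ∈ pvMapping, decide (ps.1 ∈ sp.2) = (ps.2 == sp.1)))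
    (by revert hsp; revert sp;
        exact (by decide : ∀ sp ∈ pvSources, ("derived" == sp.1) = false)) s

theorem pv_B_eq (signals : List String) : group_signals_py_alt signals = pvCanon signals := by
  simp only [group_signals_py_alt, pvCanon]
  have hbody : (fun (acc : List (String × List String)) (sp : String × List String) =>
      if (signals.filter (fun s => pvMatchesAny s sp.2)).isEmpty then acc
      else acc ++ [(sp.1, signals.filter (fun s => pvMatchesAny s sp.2))]) =
      (fun acc sp =>
        if !(signals.filter (fun s => pvMatchesAny s sp.2)).isEmpty
        then acc ++ [(sp.1, signals.filter (fun s => pvMatchesAny s sp.2))] else acc) := by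
    funext acc sp
    cases h : (signals.filter (fun s => pvMatchesAny s sp.2)).isEmpty <;> simp
  rw [hbody, PySem.List.foldl_append_if, List.nil_append]
  have hmap : (pvSources.filter
        (fun sp => !(signals.filter (fun s => pvMatchesAny s sp.2)).isEmpty)).map
        (fun sp => (sp.1, signals.filter (fun s => pvMatchesAny s sp.2))) =
      ((pvSources.map (·.1)).map
        (fun k => (k, signals.filter (fun s => pvClassify s == k)))).filter
        (fun kv => !kv.2.isEmpty) := by
    rw [List.map_map, List.filter_map]
    have : pvSources.filter (fun sp => !(signals.filter (fun s => pvMatchesAny s sp.2)).isEmpty)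
        = pvSources.filter
            (fun sp => ((fun kv : String × List String => !kv.2.isEmpty) ∘
              ((fun k => (k, signals.filter (fun s => pvClassify s == k))) ∘ (·.1))) sp) := by
      apply List.filter_congr
      intro sp hsp
      simp only [Function.comp_def]
      rw [pv_cat_src sp hsp signals]
    rw [this]
    apply List.map_congr_left
    intro sp hsp
    have hsp' := List.mem_of_mem_filter hsp
    simp only [Function.comp_def]
    rw [pv_cat_src sp hsp' signals]
  rw [hmap]
  have hkeys : pvInitKeys = pvSources.map (·.1) ++ ["derived"] := by decide
  rw [hkeys, List.map_append, List.filter_append]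
  have hder : signals.filter (fun s => !pvMatchesAny s pvAllPrefixes)
      = signals.filter (fun s => pvClassify s == "derived") := by
    apply List.filter_congr
    intro s _
    exact pv_derived s
  cases h : (signals.filter (fun s => !pvMatchesAny s pvAllPrefixes)).isEmpty with
  | true =>
    rw [if_pos rfl]
    have : (["derived"].map (fun k => (k, signals.filter (fun s => pvClassify s == k)))).filter
        (fun kv => !kv.2.isEmpty) = [] := by
      simp only [List.map_cons, List.map_nil, List.filter]
      rw [← hder, h]
      rfl
    rw [this, List.append_nil]
  | false =>
    rw [if_neg Bool.false_ne_true]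
    congr 1
    simp only [List.map_cons, List.map_nil, List.filter]
    rw [← hder, h]
    rfl

-- ===== VERDICT (by name: the statement is the Claim_ definition above) =====
theorem group_signals_py_spec : Claim_equal_group_signals_py := by
  intro signals _
  unfold Spec_group_signals_py
  rw [pv_A_eq, pv_B_eq]
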